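-- pv_equiv track=rewrite | github.com/ragib-work/DSA-5-hr-day-with-ragib | day_2/string_3.py | diff_cons_vowel
-- ===== SOURCE A (Python) =====
-- def diff_cons_vowel(s):
--     vowels = 0
--     consonants = 0
--     for i in s:
--         if "a" <= i <= "z" or "A" <= i <= "Z":
--             if i in "aeiouAEIOU":
--                 vowels+=1
--             else :
--                 consonants+=1
--     return consonants-vowels
-- ===== SOURCE B (Python) =====
-- def diff_cons_vowel(s):
--     letters = sum(1 for i in s if "a" <= i <= "z" or "A" <= i <= "Z")
--     vowels = sum(1 for i in s if i in "aeiouAEIOU")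
--     return letters - 2 * vowels
-- ===== Notes on version B (the rewrite author's own statement) =====
-- stated objective: alternative
-- what changed: Replaces the single branching loop over paired vowel/consonant counters by two independent filtered counts (letters and vowels) combined algebraically via consonants - vowels = letters - 2*vowels.
import Mathlib
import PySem

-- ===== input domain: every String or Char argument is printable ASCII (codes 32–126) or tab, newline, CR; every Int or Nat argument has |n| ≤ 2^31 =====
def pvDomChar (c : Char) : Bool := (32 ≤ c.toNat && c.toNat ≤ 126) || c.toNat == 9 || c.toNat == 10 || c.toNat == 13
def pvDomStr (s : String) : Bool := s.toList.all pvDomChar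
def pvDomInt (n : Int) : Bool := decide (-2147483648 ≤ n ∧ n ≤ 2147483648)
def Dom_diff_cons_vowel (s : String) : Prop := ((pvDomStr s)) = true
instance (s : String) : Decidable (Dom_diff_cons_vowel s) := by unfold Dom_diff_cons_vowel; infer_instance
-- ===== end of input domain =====

-- B replaces A's single branching loop with two filtered counts combined by
-- consonants - vowels = letters - 2*vowels (alternative decomposition, same cost).

-- ===== PORT A =====
def pvIsLetter (c : Char) : Bool := ('a' ≤ c && c ≤ 'z') || ('A' ≤ c && c ≤ 'Z')
def pvIsVowel (c : Char) : Bool := "aeiouAEIOU".toList.contains c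

def pvLoopA : List Char → Int × Int → Int × Int
  | [], acc => acc
  | i :: rest, (v, c) =>
    pvLoopA rest (if pvIsLetter i then (if pvIsVowel i then (v + 1, c) else (v, c + 1)) else (v, c))

def diff_cons_vowel (s : String) : Int :=
  let r := pvLoopA s.toList (0, 0)
  r.2 - r.1

-- ===== PORT B =====
def diff_cons_vowel_alt (s : String) : Int :=
  let letters : Int := (s.toList.filter pvIsLetter).length
  let vowels : Int := (s.toList.filter pvIsVowel).length
  letters - 2 * vowels

-- ===== PRECONDITION & SPEC =====
def Spec_diff_cons_vowel (s : String) (out : Int) : Prop := out = diff_cons_vowel_alt s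
instance (s : String) (out : Int) : Decidable (Spec_diff_cons_vowel s out) := by unfold Spec_diff_cons_vowel; infer_instance

-- ===== CLAIM (what is proved, stated in full; the proofs are below) =====
def Claim_equal_diff_cons_vowel : Prop := ∀ (s : String), Dom_diff_cons_vowel s → Spec_diff_cons_vowel s (diff_cons_vowel s)

-- ===== LEMMAS AND PROOFS =====

-- ===== VERDICT (by name: the statement is the Claim_ definition above) =====
lemma pvVowel_letter (c : Char) (h : pvIsVowel c = true) : pvIsLetter c = true := by
  simp [pvIsVowel] at h
  rcases h with h|h|h|h|h|h|h|h|h|h <;> subst h <;> decide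

lemma pvLoopA_inv (l : List Char) : ∀ v c : Int,
    (pvLoopA l (v, c)).2 - (pvLoopA l (v, c)).1 =
      c - v + ((l.filter pvIsLetter).length : Int) - 2 * ((l.filter pvIsVowel).length : Int) := by
  induction l with
  | nil => intro v c; simp [pvLoopA]
  | cons i rest ih =>
    intro v c
    by_cases hl : pvIsLetter i = true
    · by_cases hv : pvIsVowel i = true
      · simp [pvLoopA, hl, hv, ih]; ring
      · simp [pvLoopA, hl, hv, ih]; ring
    · have hv : pvIsVowel i = false := by
        cases hvv : pvIsVowel i
        · rfl
        · exact absurd (pvVowel_letter i hvv) hl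
      simp [pvLoopA, hl, hv, ih]

theorem diff_cons_vowel_spec : Claim_equal_diff_cons_vowel := by
  intro s _
  unfold Spec_diff_cons_vowel diff_cons_vowel diff_cons_vowel_alt
  have := pvLoopA_inv s.toList 0 0
  simp at this ⊢
  omega
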